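-- pv_equiv track=rewrite | github.com/antoinebaker/ml_physics_utils | experiment.py | get_batch_positions
-- ===== SOURCE A (Python) =====
-- def get_batch_positions(n_total, n_batch):
--     """Return the batch positions when dividing n_total in n_batch."""
--     if (n_batch < 1):
--         raise ValueError("n_batch must be greater than 1")
--     if (n_batch > n_total):
--         raise ValueError("n_batch must be less than n_total")
--     # n_total = q*n_batch + r = r*(q+1) + (n_batch-r)*q
--     q, r = divmod(n_total, n_batch)
--     # r batches of size q+1 and (n_batch-r) batches of size q
--     batch_sizes = r * [q + 1] + (n_batch - r) * [q]
--     batch_end, batch_positions = 0, []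
--     for batch_size in batch_sizes:
--         batch_start = batch_end
--         batch_end = batch_start + batch_size
--         batch_positions.append((batch_start, batch_end))
--     return batch_positions
-- ===== SOURCE B (Python) =====
-- def get_batch_positions(n_total, n_batch):
--     """Return the batch positions when dividing n_total in n_batch."""
--     if (n_batch < 1):
--         raise ValueError("n_batch must be greater than 1")
--     if (n_batch > n_total):
--         raise ValueError("n_batch must be less than n_total")
--     q, r = divmod(n_total, n_batch)
--     # batch i covers [i*q + min(i, r), (i+1)*q + min(i+1, r)): closed form, no accumulator
--     return [(i * q + min(i, r), (i + 1) * q + min(i + 1, r)) for i in range(n_batch)]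
-- ===== Notes on version B (the rewrite author's own statement) =====
-- stated objective: alternative
-- what changed: B replaces A's batch_sizes list and running-sum accumulator loop by a closed-form comprehension computing each batch's (start, end) directly from its index i as (i*q+min(i,r), (i+1)*q+min(i+1,r)).
import Mathlib
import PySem

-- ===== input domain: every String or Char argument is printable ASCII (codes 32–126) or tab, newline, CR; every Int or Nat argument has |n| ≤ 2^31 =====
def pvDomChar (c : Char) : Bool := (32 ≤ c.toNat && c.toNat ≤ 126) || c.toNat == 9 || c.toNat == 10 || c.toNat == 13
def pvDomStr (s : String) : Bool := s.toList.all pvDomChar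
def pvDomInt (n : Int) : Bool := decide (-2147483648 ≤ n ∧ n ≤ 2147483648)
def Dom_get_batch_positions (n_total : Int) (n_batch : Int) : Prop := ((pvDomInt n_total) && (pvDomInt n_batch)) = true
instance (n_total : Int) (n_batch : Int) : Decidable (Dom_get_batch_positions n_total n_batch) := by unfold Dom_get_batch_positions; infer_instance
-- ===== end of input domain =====

-- B replaces the running-sum loop over a batch_sizes list by a closed-form per-index formula (objective: alternative).

-- ===== PORT A =====
def get_batch_positions (n_total : Int) (n_batch : Int) : List (Int × Int) :=
  if n_batch < 1 then []          -- Python: raise ValueError (excluded by Pre_)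
  else if n_batch > n_total then []  -- Python: raise ValueError (excluded by Pre_)
  else
    let q := PySem.Int.floordiv n_total n_batch
    let r := PySem.Int.mod n_total n_batch
    let batch_sizes := List.replicate r.toNat (q + 1) ++ List.replicate (n_batch - r).toNat q
    (batch_sizes.foldl
      (fun (st : Int × List (Int × Int)) batch_size =>
        (st.1 + batch_size, st.2 ++ [(st.1, st.1 + batch_size)]))
      (0, [])).2

-- ===== PORT B =====
def get_batch_positions_alt (n_total : Int) (n_batch : Int) : List (Int × Int) :=
  if n_batch < 1 then []          -- Python: raise ValueError (excluded by Pre_)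
  else if n_batch > n_total then []  -- Python: raise ValueError (excluded by Pre_)
  else
    let q := PySem.Int.floordiv n_total n_batch
    let r := PySem.Int.mod n_total n_batch
    (PySem.List.pyRange 0 n_batch 1).map
      (fun i => (i * q + min i r, (i + 1) * q + min (i + 1) r))

-- ===== PRECONDITION & SPEC =====
-- Pre_ excludes exactly the inputs on which A raises ValueError (n_batch < 1 or n_batch > n_total).
def Pre_get_batch_positions (n_total : Int) (n_batch : Int) : Prop :=
  1 ≤ n_batch ∧ n_batch ≤ n_total
instance (n_total : Int) (n_batch : Int) : Decidable (Pre_get_batch_positions n_total n_batch) := by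
  unfold Pre_get_batch_positions; infer_instance
def pvWitness_get_batch_positions : Int × Int := (10, 3)
def Spec_get_batch_positions (n_total : Int) (n_batch : Int) (out : List (Int × Int)) : Prop := out = get_batch_positions_alt n_total n_batch
instance (n_total : Int) (n_batch : Int) (out : List (Int × Int)) : Decidable (Spec_get_batch_positions n_total n_batch out) := by unfold Spec_get_batch_positions; infer_instance

-- ===== CLAIM (what is proved, stated in full; the proofs are below) =====
def Claim_equal_get_batch_positions : Prop := ∀ (n_total : Int) (n_batch : Int), Dom_get_batch_positions n_total n_batch → Pre_get_batch_positions n_total n_batch → Spec_get_batch_positions n_total n_batch (get_batch_positions n_total n_batch)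

-- ===== LEMMAS AND PROOFS =====

-- A's loop, characterized: folding the sizes list from state (e, acc) appends the
-- consecutive prefix-sum intervals shifted by e.
theorem foldA_eq_map_range (sizes : List Int) (e : Int) (acc : List (Int × Int)) :
    (sizes.foldl
      (fun (st : Int × List (Int × Int)) batch_size =>
        (st.1 + batch_size, st.2 ++ [(st.1, st.1 + batch_size)]))
      (e, acc)).2
    = acc ++ (List.range sizes.length).map
        (fun i => (e + (sizes.take i).sum, e + (sizes.take (i + 1)).sum)) := by
  induction sizes generalizing e acc with
  | nil => simp
  | cons x t ih =>
    simp only [List.foldl_cons, List.length_cons, ih, List.range_succ_eq_map]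
    simp [List.map_map, Function.comp, add_assoc, add_comm]
    intro a _
    omega

-- Prefix sums of 'a copies of q+1 then b copies of q' in closed form.
theorem prefix_sum_sizes (q : Int) (a b i : ℕ) (hi : i ≤ a + b) :
    ((List.replicate a (q + 1) ++ List.replicate b q).take i).sum
      = (i : Int) * q + min (i : Int) (a : Int) := by
  by_cases h : i ≤ a
  · rw [List.take_append_of_le_length (by simpa using h), List.take_replicate,
      Nat.min_eq_left h, List.sum_replicate, nsmul_eq_mul]
    have hmin : min (i : Int) (a : Int) = (i : Int) := min_eq_left (by exact_mod_cast h)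
    rw [hmin]; ring
  · have ha : a ≤ i := by omega
    rw [List.take_append, List.take_replicate, List.take_replicate, List.length_replicate]
    have h1 : min i a = a := by omega
    have h2 : min (i - a) b = i - a := by omega
    rw [h1, h2, List.sum_append, List.sum_replicate, List.sum_replicate,
      nsmul_eq_mul, nsmul_eq_mul]
    have hmin : min (i : Int) (a : Int) = (a : Int) := min_eq_right (by exact_mod_cast ha)
    rw [hmin, Nat.cast_sub ha]
    ring

theorem get_batch_positions_spec : Claim_equal_get_batch_positions := by
  intro n_total n_batch _ hpre
  obtain ⟨h1, h2⟩ := hpre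
  unfold Spec_get_batch_positions get_batch_positions get_batch_positions_alt
  rw [if_neg (by omega), if_neg (by omega), if_neg (by omega), if_neg (by omega)]
  set q := PySem.Int.floordiv n_total n_batch with hq
  set r := PySem.Int.mod n_total n_batch with hr
  have hb0 : n_batch ≠ 0 := by omega
  have hr0 : 0 ≤ r := PySem.Int.mod_nonneg n_total (by omega)
  have hrlt : r < n_batch := PySem.Int.mod_lt n_total (by omega)
  rw [foldA_eq_map_range]
  rw [PySem.List.pyRange_one]
  have hcast : (r.toNat : Int) = r := Int.toNat_of_nonneg hr0
  have hlen : r.toNat + (n_batch - r).toNat = n_batch.toNat := by omega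
  have hsum : (0 : Int) - 0 = 0 := by ring
  simp only [List.length_append, List.length_replicate, hlen, List.nil_append,
    Int.sub_zero, List.map_map]
  apply List.map_congr_left
  intro i hi
  rw [List.mem_range] at hi
  have hi1 : i ≤ r.toNat + (n_batch - r).toNat := by omega
  have hi2 : i + 1 ≤ r.toNat + (n_batch - r).toNat := by omega
  simp only [Function.comp_apply, zero_add,
    prefix_sum_sizes q r.toNat (n_batch - r).toNat i hi1,
    prefix_sum_sizes q r.toNat (n_batch - r).toNat (i + 1) hi2, hcast]
  push_cast
  ring_nf

-- ===== VERDICT (by name: the statement is the Claim_ definition above) =====
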